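-- pv_equiv track=rewrite | github.com/YoungHo-K/problem-solving | 프로그래머스/1/133499. 옹알이 （2）/옹알이 （2）.py | solution
-- ===== SOURCE A (Python) =====
-- def solution(babbling):
--     use_words = ["aya", "ye", "woo", "ma"]
--
--     answer = 0
--     for word in babbling:
--         if word in use_words:
--             answer += 1
--             continue
--
--         prev = ""
--         curr = ""
--         for w in word:
--             curr += w
--
--             if (prev != curr) and (curr in use_words):
--                 prev = curr
--                 curr = ""
--                 continue
--
--         if curr == "":
--             answer += 1
--
--     return answer
-- ===== SOURCE B (Python) =====
-- def solution(babbling):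
--     words = ["aya", "ye", "woo", "ma"]
--     count = 0
--     for b in babbling:
--         s = b
--         last = ""
--         while s:
--             for w in words:
--                 if w != last and s.startswith(w):
--                     s = s[len(w):]
--                     last = w
--                     break
--             else:
--                 break
--         if s == "":
--             count += 1
--     return count
-- ===== Notes on version B (the rewrite author's own statement) =====
-- stated objective: simpler
-- what changed: Replaces A's per-character prev/curr accumulator state machine (plus its membership shortcut for exact words) by whole-token prefix stripping: a while loop that repeatedly removes an allowed word from the front via startswith/slicing, tracking only the last removed word.
import Mathlib
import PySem

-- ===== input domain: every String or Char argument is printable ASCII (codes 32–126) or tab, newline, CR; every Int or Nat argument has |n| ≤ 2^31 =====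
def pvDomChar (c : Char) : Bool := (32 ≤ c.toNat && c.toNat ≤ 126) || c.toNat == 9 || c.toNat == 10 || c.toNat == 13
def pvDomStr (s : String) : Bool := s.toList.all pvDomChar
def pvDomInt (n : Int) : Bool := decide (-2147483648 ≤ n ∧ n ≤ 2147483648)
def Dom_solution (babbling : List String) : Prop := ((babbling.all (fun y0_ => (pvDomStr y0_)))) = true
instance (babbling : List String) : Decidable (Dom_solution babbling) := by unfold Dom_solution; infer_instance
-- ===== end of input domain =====

-- B replaces A's per-character prev/curr accumulator state machine by whole-token
-- prefix stripping (startswith + slice) over the allowed-word list; same values everywhere.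

-- ===== PORT A =====
-- the allowed words, as character lists (Python compares strings; List Char is the faithful view)
def useL : List (List Char) := [['a','y','a'], ['y','e'], ['w','o','o'], ['m','a']]

-- one step of A's inner character loop: state is (prev, curr)
def stepA (pc : List Char × List Char) (ch : Char) : List Char × List Char :=
  if pc.1 ≠ pc.2 ++ [ch] ∧ pc.2 ++ [ch] ∈ useL then (pc.2 ++ [ch], []) else (pc.1, pc.2 ++ [ch])

def solution (babbling : List String) : Int :=
  babbling.foldl (fun answer word =>
    if word.toList ∈ useL then answer + 1
    else if (word.toList.foldl stepA ([], [])).2 = [] then answer + 1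
    else answer) 0

-- ===== PORT B =====
-- B's while loop: strip an allowed word (≠ last stripped one) from the front while possible
def okB : List Char → List Char → Bool
  | [], _ => true
  | c :: cs, last =>
    if last ≠ ['a','y','a'] ∧ (['a','y','a'] : List Char).isPrefixOf (c :: cs) then okB ((c :: cs).drop 3) ['a','y','a']
    else if last ≠ ['y','e'] ∧ (['y','e'] : List Char).isPrefixOf (c :: cs) then okB ((c :: cs).drop 2) ['y','e']
    else if last ≠ ['w','o','o'] ∧ (['w','o','o'] : List Char).isPrefixOf (c :: cs) then okB ((c :: cs).drop 3) ['w','o','o']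
    else if last ≠ ['m','a'] ∧ (['m','a'] : List Char).isPrefixOf (c :: cs) then okB ((c :: cs).drop 2) ['m','a']
    else false
termination_by s _ => s.length
decreasing_by all_goals (simp; try omega)

def solution_alt (babbling : List String) : Int :=
  babbling.foldl (fun count b => if okB b.toList [] then count + 1 else count) 0

-- ===== PRECONDITION & SPEC =====
def Spec_solution (babbling : List String) (out : Int) : Prop := out = solution_alt babbling
instance (babbling : List String) (out : Int) : Decidable (Spec_solution babbling out) := by unfold Spec_solution; infer_instance

-- ===== CLAIM (what is proved, stated in full; the proofs are below) =====
def Claim_equal_solution : Prop := ∀ (babbling : List String), Dom_solution babbling → Spec_solution babbling (solution babbling)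

-- ===== LEMMAS AND PROOFS =====

-- If no allowed word other than `prev` will ever align with the front of curr ++ s,
-- A's inner loop never resets: it just accumulates the rest of the word.
theorem stuck (s : List Char) : ∀ (prev curr : List Char),
    (∀ t ∈ useL, t ≠ prev → ¬ (curr <+: t ∧ t <+: curr ++ s)) →
    List.foldl stepA (prev, curr) s = (prev, curr ++ s) := by
  induction s with
  | nil => intro prev curr _; simp
  | cons c cs ih =>
    intro prev curr H
    have hstep : stepA (prev, curr) c = (prev, curr ++ [c]) := by
      unfold stepA; split
      · next hc =>
        exact absurd (⟨List.prefix_append curr [c], ⟨cs, by simp⟩⟩ :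
            curr <+: curr ++ [c] ∧ (curr ++ [c]) <+: curr ++ c :: cs)
          (H (curr ++ [c]) hc.2 (fun h => hc.1 h.symm))
      · rfl
    have H' : ∀ t ∈ useL, t ≠ prev → ¬ ((curr ++ [c]) <+: t ∧ t <+: (curr ++ [c]) ++ cs) := by
      rintro t ht htp ⟨hp1, hp2⟩
      exact H t ht htp ⟨List.IsPrefix.trans (List.prefix_append curr [c]) hp1, by simpa using hp2⟩
    calc List.foldl stepA (prev, curr) (c :: cs)
        = List.foldl stepA (prev, curr ++ [c]) cs := by rw [List.foldl_cons, hstep]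
      _ = (prev, (curr ++ [c]) ++ cs) := ih (prev) (curr ++ [c]) H'
      _ = (prev, curr ++ c :: cs) := by simp

-- main correspondence: A's inner loop succeeds from state (prev, "") iff B's stripping does
theorem mainL : ∀ (n : Nat) (s : List Char), s.length ≤ n → ∀ prev,
    (((List.foldl stepA (prev, ([] : List Char)) s).2 = []) ↔ okB s prev = true) := by
  intro n
  induction n with
  | zero =>
    intro s hs prev
    have hnil : s = [] := by cases s <;> simp_all
    subst hnil; simp [okB]
  | succ n ih =>
    intro s hs prev
    match s with
    | [] => simp [okB]
    | c :: cs =>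
      by_cases h1 : prev ≠ ['a','y','a'] ∧ (['a','y','a'] : List Char).isPrefixOf (c :: cs)
      · obtain ⟨rest, hr⟩ := List.isPrefixOf_iff_prefix.mp h1.2
        have hcc : c :: cs = 'a' :: 'y' :: 'a' :: rest := hr.symm
        rw [hcc]
        have hfold : List.foldl stepA (prev, ([] : List Char)) ('a' :: 'y' :: 'a' :: rest)
            = List.foldl stepA (['a','y','a'], []) rest := by
          have e1 : stepA (prev, []) 'a' = (prev, ['a']) := by
            show (if prev ≠ ['a'] ∧ (['a'] : List Char) ∈ useL then ((['a'] : List Char), ([] : List Char)) else (prev, ['a'])) = (prev, ['a'])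
            rw [if_neg (fun hc => absurd hc.2 (by decide))]
          have e2 : stepA (prev, ['a']) 'y' = (prev, ['a','y']) := by
            show (if prev ≠ ['a','y'] ∧ (['a','y'] : List Char) ∈ useL then ((['a','y'] : List Char), ([] : List Char)) else (prev, ['a','y'])) = (prev, ['a','y'])
            rw [if_neg (fun hc => absurd hc.2 (by decide))]
          have e3 : stepA (prev, ['a','y']) 'a' = (['a','y','a'], []) := by
            show (if prev ≠ ['a','y','a'] ∧ (['a','y','a'] : List Char) ∈ useL then ((['a','y','a'] : List Char), ([] : List Char)) else (prev, ['a','y','a'])) = ((['a','y','a'] : List Char), ([] : List Char))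
            rw [if_pos ⟨h1.1, by decide⟩]
          rw [List.foldl_cons, e1, List.foldl_cons, e2, List.foldl_cons, e3]
        rw [hfold, okB, if_pos (by rw [← hcc]; exact h1)]
        simp only [List.drop_succ_cons, List.drop_zero]
        exact ih rest (by have hl := congrArg List.length hcc; simp at hl hs; omega) _
      by_cases h2 : prev ≠ ['y','e'] ∧ (['y','e'] : List Char).isPrefixOf (c :: cs)
      · obtain ⟨rest, hr⟩ := List.isPrefixOf_iff_prefix.mp h2.2
        have hcc : c :: cs = 'y' :: 'e' :: rest := hr.symm
        rw [hcc]
        have hfold : List.foldl stepA (prev, ([] : List Char)) ('y' :: 'e' :: rest)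
            = List.foldl stepA (['y','e'], []) rest := by
          have e1 : stepA (prev, []) 'y' = (prev, ['y']) := by
            show (if prev ≠ ['y'] ∧ (['y'] : List Char) ∈ useL then ((['y'] : List Char), ([] : List Char)) else (prev, ['y'])) = (prev, ['y'])
            rw [if_neg (fun hc => absurd hc.2 (by decide))]
          have e2 : stepA (prev, ['y']) 'e' = (['y','e'], []) := by
            show (if prev ≠ ['y','e'] ∧ (['y','e'] : List Char) ∈ useL then ((['y','e'] : List Char), ([] : List Char)) else (prev, ['y','e'])) = ((['y','e'] : List Char), ([] : List Char))
            rw [if_pos ⟨h2.1, by decide⟩]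
          rw [List.foldl_cons, e1, List.foldl_cons, e2]
        rw [hfold, okB, if_neg (by rw [← hcc]; exact h1), if_pos (by rw [← hcc]; exact h2)]
        simp only [List.drop_succ_cons, List.drop_zero]
        exact ih rest (by have hl := congrArg List.length hcc; simp at hl hs; omega) _
      by_cases h3 : prev ≠ ['w','o','o'] ∧ (['w','o','o'] : List Char).isPrefixOf (c :: cs)
      · obtain ⟨rest, hr⟩ := List.isPrefixOf_iff_prefix.mp h3.2
        have hcc : c :: cs = 'w' :: 'o' :: 'o' :: rest := hr.symm
        rw [hcc]
        have hfold : List.foldl stepA (prev, ([] : List Char)) ('w' :: 'o' :: 'o' :: rest)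
            = List.foldl stepA (['w','o','o'], []) rest := by
          have e1 : stepA (prev, []) 'w' = (prev, ['w']) := by
            show (if prev ≠ ['w'] ∧ (['w'] : List Char) ∈ useL then ((['w'] : List Char), ([] : List Char)) else (prev, ['w'])) = (prev, ['w'])
            rw [if_neg (fun hc => absurd hc.2 (by decide))]
          have e2 : stepA (prev, ['w']) 'o' = (prev, ['w','o']) := by
            show (if prev ≠ ['w','o'] ∧ (['w','o'] : List Char) ∈ useL then ((['w','o'] : List Char), ([] : List Char)) else (prev, ['w','o'])) = (prev, ['w','o'])
            rw [if_neg (fun hc => absurd hc.2 (by decide))]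
          have e3 : stepA (prev, ['w','o']) 'o' = (['w','o','o'], []) := by
            show (if prev ≠ ['w','o','o'] ∧ (['w','o','o'] : List Char) ∈ useL then ((['w','o','o'] : List Char), ([] : List Char)) else (prev, ['w','o','o'])) = ((['w','o','o'] : List Char), ([] : List Char))
            rw [if_pos ⟨h3.1, by decide⟩]
          rw [List.foldl_cons, e1, List.foldl_cons, e2, List.foldl_cons, e3]
        rw [hfold, okB, if_neg (by rw [← hcc]; exact h1), if_neg (by rw [← hcc]; exact h2), if_pos (by rw [← hcc]; exact h3)]
        simp only [List.drop_succ_cons, List.drop_zero]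
        exact ih rest (by have hl := congrArg List.length hcc; simp at hl hs; omega) _
      by_cases h4 : prev ≠ ['m','a'] ∧ (['m','a'] : List Char).isPrefixOf (c :: cs)
      · obtain ⟨rest, hr⟩ := List.isPrefixOf_iff_prefix.mp h4.2
        have hcc : c :: cs = 'm' :: 'a' :: rest := hr.symm
        rw [hcc]
        have hfold : List.foldl stepA (prev, ([] : List Char)) ('m' :: 'a' :: rest)
            = List.foldl stepA (['m','a'], []) rest := by
          have e1 : stepA (prev, []) 'm' = (prev, ['m']) := by
            show (if prev ≠ ['m'] ∧ (['m'] : List Char) ∈ useL then ((['m'] : List Char), ([] : List Char)) else (prev, ['m'])) = (prev, ['m'])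
            rw [if_neg (fun hc => absurd hc.2 (by decide))]
          have e2 : stepA (prev, ['m']) 'a' = (['m','a'], []) := by
            show (if prev ≠ ['m','a'] ∧ (['m','a'] : List Char) ∈ useL then ((['m','a'] : List Char), ([] : List Char)) else (prev, ['m','a'])) = ((['m','a'] : List Char), ([] : List Char))
            rw [if_pos ⟨h4.1, by decide⟩]
          rw [List.foldl_cons, e1, List.foldl_cons, e2]
        rw [hfold, okB, if_neg (by rw [← hcc]; exact h1), if_neg (by rw [← hcc]; exact h2), if_neg (by rw [← hcc]; exact h3), if_pos (by rw [← hcc]; exact h4)]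
        simp only [List.drop_succ_cons, List.drop_zero]
        exact ih rest (by have hl := congrArg List.length hcc; simp at hl hs; omega) _
      -- no strippable word: A's loop never resets, both sides fail
      have H : ∀ t ∈ useL, t ≠ prev → ¬ (([] : List Char) <+: t ∧ t <+: [] ++ (c :: cs)) := by
        intro t ht htp hpair
        have hb : t.isPrefixOf (c :: cs) = true := List.isPrefixOf_iff_prefix.mpr (by simpa using hpair.2)
        simp only [useL, List.mem_cons, List.not_mem_nil, or_false] at ht
        rcases ht with rfl | rfl | rfl | rfl
        · exact h1 ⟨fun h => htp h.symm, hb⟩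
        · exact h2 ⟨fun h => htp h.symm, hb⟩
        · exact h3 ⟨fun h => htp h.symm, hb⟩
        · exact h4 ⟨fun h => htp h.symm, hb⟩
      rw [stuck (c :: cs) prev [] H, okB, if_neg h1, if_neg h2, if_neg h3, if_neg h4]
      simp

theorem step_eq (word : String) (answer : Int) :
    (if word.toList ∈ useL then answer + 1
     else if (word.toList.foldl stepA ([], [])).2 = [] then answer + 1
     else answer)
    = (if okB word.toList [] then answer + 1 else answer) := by
  by_cases hm : word.toList ∈ useL
  · rw [if_pos hm]
    have hok : okB word.toList [] = true := by
      rw [← mainL word.toList.length word.toList le_rfl []]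
      simp only [useL, List.mem_cons, List.not_mem_nil, or_false] at hm
      rcases hm with h | h | h | h <;> rw [h] <;> decide
    rw [if_pos hok]
  · rw [if_neg hm]
    by_cases hf : (word.toList.foldl stepA ([], [])).2 = []
    · rw [if_pos hf, if_pos ((mainL word.toList.length word.toList le_rfl []).mp hf)]
    · rw [if_neg hf, if_neg (fun h => hf ((mainL word.toList.length word.toList le_rfl []).mpr h))]

-- ===== VERDICT (by name: the statement is the Claim_ definition above) =====
theorem solution_spec : Claim_equal_solution := by
  intro babbling _
  unfold Spec_solution solution solution_alt
  have hf : (fun (answer : Int) (word : String) =>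
      if word.toList ∈ useL then answer + 1
      else if (List.foldl stepA ([], []) word.toList).2 = [] then answer + 1
      else answer)
      = (fun (count : Int) (b : String) => if okB b.toList [] then count + 1 else count) := by
    funext a w; exact step_eq w a
  rw [hf]
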